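-- pv_equiv track=rewrite | github.com/vaibz96/Special-Topics-in-Software-Engineering-Course-work | Homework 5/Homework05-Vaibhav.py | rev_enumerate
-- ===== SOURCE A (Python) =====
-- def rev_enumerate(str):
--     string=''
--     index_val = len(str)
--     """
--     While loop will start with the length of the string and decrement the index
--     and return the value at that index
--     """
--     while index_val:
--         index_val -= 1
--         string += str[index_val]
--     count = len(string)
--     """
--     the count will store the length of the string
--     and the while iterate through each string returning the count in reverse order as an offset in reverse order
--     """
--     while count:
--         for i in string:
--             """the default index of any element in a string is 0 I have yielded count-1 """
--             yield count-1, i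
--             count -= 1
-- ===== SOURCE B (Python) =====
-- def rev_enumerate(str):
--     for i in range(len(str) - 1, -1, -1):
--         yield i, str[i]
-- ===== Notes on version B (the rewrite author's own statement) =====
-- stated objective: simpler
-- what changed: B drops A's quadratic build-a-reversed-copy-by-+= pass and its count-decrementing second loop, yielding (i, str[i]) directly over a descending range in one indexed pass.
import Mathlib
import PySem

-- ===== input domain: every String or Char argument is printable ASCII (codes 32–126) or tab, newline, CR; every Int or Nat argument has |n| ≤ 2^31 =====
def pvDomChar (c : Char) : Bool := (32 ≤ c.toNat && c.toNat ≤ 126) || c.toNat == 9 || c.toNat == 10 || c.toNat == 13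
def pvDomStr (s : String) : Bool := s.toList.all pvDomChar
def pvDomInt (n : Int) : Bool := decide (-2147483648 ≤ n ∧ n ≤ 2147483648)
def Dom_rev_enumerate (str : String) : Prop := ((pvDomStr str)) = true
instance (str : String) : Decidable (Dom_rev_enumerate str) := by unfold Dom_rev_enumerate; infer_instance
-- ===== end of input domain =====

-- B replaces A's quadratic reversed-copy build (string += str[i]) and second
-- count-decrementing loop by one direct pass yielding (i, str[i]) over a
-- descending range (objective: simpler).


-- ===== PORT A =====
-- `while index_val: index_val -= 1; string += str[index_val]` — builds the
-- reversed char list; index_val - 1 is always in range, so getD never defaults.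
def pvBuildRevA (cs : List Char) : Nat → List Char → List Char
  | 0, acc => acc
  | i + 1, acc => pvBuildRevA cs i (acc ++ [cs.getD i ' '])

-- `while count: for i in string: yield count-1, i; count -= 1` — after the for
-- loop count is 0, so the outer while runs at most once; consumed as a list.
def pvYieldA : List Char → Int → List (Int × String)
  | [], _ => []
  | c :: rest, count => (count - 1, String.ofList [c]) :: pvYieldA rest (count - 1)

def rev_enumerate (str : String) : List (Int × String) :=
  let string := pvBuildRevA str.toList str.toList.length []
  pvYieldA string (string.length : Int)

-- ===== PORT B =====
-- `for i in range(len(str)-1, -1, -1): yield i, str[i]` — i is always in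
-- range, so getD never defaults.
def rev_enumerate_alt (str : String) : List (Int × String) :=
  (PySem.List.pyRange ((str.toList.length : Int) - 1) (-1) (-1)).map
    (fun i => (i, String.ofList [str.toList.getD i.toNat ' ']))

-- ===== PRECONDITION & SPEC =====
def Spec_rev_enumerate (str : String) (out : List (Int × String)) : Prop := out = rev_enumerate_alt str
instance (str : String) (out : List (Int × String)) : Decidable (Spec_rev_enumerate str out) := by unfold Spec_rev_enumerate; infer_instance

-- ===== CLAIM (what is proved, stated in full; the proofs are below) =====
def Claim_equal_rev_enumerate : Prop := ∀ (str : String), Dom_rev_enumerate str → Spec_rev_enumerate str (rev_enumerate str)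

-- ===== LEMMAS AND PROOFS =====

theorem pvBuildRevA_eq (cs : List Char) :
    ∀ (i : Nat), i ≤ cs.length → ∀ acc, pvBuildRevA cs i acc = acc ++ (cs.take i).reverse := by
  intro i
  induction i with
  | zero => intro _ acc; simp [pvBuildRevA]
  | succ j ih =>
    intro h acc
    have hj : j < cs.length := by omega
    rw [pvBuildRevA, ih (by omega), List.append_assoc]
    congr 1
    rw [List.take_add_one, List.getElem?_eq_getElem hj, Option.toList_some,
      List.reverse_append, List.reverse_singleton, List.singleton_append]
    simp [List.getD, List.getElem?_eq_getElem hj]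

theorem pvYieldA_eq (cs : List Char) :
    pvYieldA cs.reverse (cs.length : Int) =
      (PySem.List.pyRange ((cs.length : Int) - 1) (-1) (-1)).map
        (fun i => (i, String.ofList [cs.getD i.toNat ' '])) := by
  induction cs using List.reverseRecOn with
  | nil => simp [pvYieldA, PySem.List.pyRange_neg_one_eq_nil]
  | append_singleton cs c ih =>
    have hn : ((cs.length : Int) + 1) - 1 = (cs.length : Int) := by ring
    rw [List.reverse_append, List.length_append]
    simp only [List.length_cons, List.length_nil, List.reverse_singleton,
      List.singleton_append, pvYieldA]
    push_cast
    rw [hn,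
      PySem.List.pyRange_neg_one_cons (by omega : (-1 : Int) < (cs.length : Int))]
    rw [List.map_cons]
    refine congrArg₂ List.cons ?_ ?_
    · simp [List.getD]
    · rw [ih]
      apply List.map_congr_left
      intro i hi
      rw [PySem.List.mem_pyRange_neg_one] at hi
      have hlt : i.toNat < cs.length := by omega
      simp [List.getD, List.getElem?_append_left hlt]

-- ===== VERDICT (by name: the statement is the Claim_ definition above) =====
theorem rev_enumerate_spec : Claim_equal_rev_enumerate := by
  intro str _
  unfold Spec_rev_enumerate rev_enumerate rev_enumerate_alt
  rw [pvBuildRevA_eq str.toList str.toList.length (le_refl _) []]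
  simp only [List.take_length, List.nil_append, List.length_reverse]
  exact pvYieldA_eq str.toList
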